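-- pv_equiv track=rewrite | github.com/frankugh/weavers_of_power | battle_session.py | _clockwise_ring_offsets
-- ===== SOURCE A (Python) =====
-- def _clockwise_ring_offsets(radius: int) -> list[tuple[int, int]]:
--     offsets: list[tuple[int, int]] = [(radius, 0)]
--     for dy in range(1, radius + 1):
--         offsets.append((radius, dy))
--     for dx in range(radius - 1, -radius - 1, -1):
--         offsets.append((dx, radius))
--     for dy in range(radius - 1, -radius - 1, -1):
--         offsets.append((-radius, dy))
--     for dx in range(-radius + 1, radius + 1):
--         offsets.append((dx, -radius))
--     return offsets
-- ===== SOURCE B (Python) =====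
-- def _clockwise_ring_offsets(radius: int) -> list[tuple[int, int]]:
--     x, y = radius, 0
--     offsets = [(x, y)]
--     for (dx, dy), steps in (((0, 1), radius),
--                             ((-1, 0), 2 * radius),
--                             ((0, -1), 2 * radius),
--                             ((1, 0), 2 * radius)):
--         for _ in range(steps):
--             x += dx
--             y += dy
--             offsets.append((x, y))
--     return offsets
-- ===== Notes on version B (the rewrite author's own statement) =====
-- stated objective: alternative
-- what changed: Replaces four hard-coded range loops with one cursor walk over a (direction, step-count) segment table, appending the running position.
import Mathlib
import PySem

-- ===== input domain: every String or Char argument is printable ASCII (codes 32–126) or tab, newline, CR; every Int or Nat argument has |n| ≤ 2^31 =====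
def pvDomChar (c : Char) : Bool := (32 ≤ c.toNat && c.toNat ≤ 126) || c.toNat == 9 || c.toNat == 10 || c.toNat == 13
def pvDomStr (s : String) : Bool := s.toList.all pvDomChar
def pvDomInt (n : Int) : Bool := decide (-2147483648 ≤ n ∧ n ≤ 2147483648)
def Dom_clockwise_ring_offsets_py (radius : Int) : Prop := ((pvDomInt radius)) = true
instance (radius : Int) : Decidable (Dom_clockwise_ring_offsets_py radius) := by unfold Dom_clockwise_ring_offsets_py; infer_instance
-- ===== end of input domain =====

-- B replaces A's four hard-coded range loops by one cursor walk over a (direction, step-count)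
-- segment table (objective: alternative decomposition, same cost).


-- ===== PORT A =====
def clockwise_ring_offsets_py (radius : Int) : List (Int × Int) :=
  let offsets : List (Int × Int) := [(radius, 0)]
  let offsets := (PySem.List.pyRange 1 (radius + 1) 1).foldl
    (fun acc dy => acc ++ [(radius, dy)]) offsets
  let offsets := (PySem.List.pyRange (radius - 1) (-radius - 1) (-1)).foldl
    (fun acc dx => acc ++ [(dx, radius)]) offsets
  let offsets := (PySem.List.pyRange (radius - 1) (-radius - 1) (-1)).foldl
    (fun acc dy => acc ++ [(-radius, dy)]) offsets
  (PySem.List.pyRange (-radius + 1) (radius + 1) 1).foldl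
    (fun acc dx => acc ++ [(dx, -radius)]) offsets

-- ===== PORT B =====
def clockwise_ring_offsets_py_alt (radius : Int) : List (Int × Int) :=
  let segs : List ((Int × Int) × Int) :=
    [((0, 1), radius), ((-1, 0), 2 * radius), ((0, -1), 2 * radius), ((1, 0), 2 * radius)]
  (segs.foldl
    (fun (st : (Int × Int) × List (Int × Int)) seg =>
      (PySem.List.pyRange 0 seg.2 1).foldl
        (fun st _ =>
          ((st.1.1 + seg.1.1, st.1.2 + seg.1.2),
           st.2 ++ [(st.1.1 + seg.1.1, st.1.2 + seg.1.2)])) st)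
    ((radius, 0), [(radius, 0)])).2

-- ===== PRECONDITION & SPEC =====
def Spec_clockwise_ring_offsets_py (radius : Int) (out : List (Int × Int)) : Prop := out = clockwise_ring_offsets_py_alt radius
instance (radius : Int) (out : List (Int × Int)) : Decidable (Spec_clockwise_ring_offsets_py radius out) := by unfold Spec_clockwise_ring_offsets_py; infer_instance

-- ===== CLAIM (what is proved, stated in full; the proofs are below) =====
def Claim_equal_clockwise_ring_offsets_py : Prop := ∀ (radius : Int), Dom_clockwise_ring_offsets_py radius → Spec_clockwise_ring_offsets_py radius (clockwise_ring_offsets_py radius)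

-- ===== LEMMAS AND PROOFS =====

-- canonical form both ports are proved equal to
def pvRing (r : Int) : List (Int × Int) :=
  [(r, 0)]
  ++ (List.range r.toNat).map (fun (k : Nat) => ((r : Int), (k : Int) + 1))
  ++ (List.range (2 * r).toNat).map (fun (k : Nat) => (r - 1 - (k : Int), r))
  ++ (List.range (2 * r).toNat).map (fun (k : Nat) => (-r, r - 1 - (k : Int)))
  ++ (List.range (2 * r).toNat).map (fun (k : Nat) => (-r + 1 + (k : Int), -r))

lemma map_range_ext {β : Type} (n : Nat) (f g : Nat → β) (h : ∀ k : Nat, f k = g k) :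
    (List.range n).map f = (List.range n).map g :=
  List.map_congr_left (fun k _ => h k)

lemma walk_eq {α : Type} (dx dy : Int) (l : List α) (px py : Int) (acc : List (Int × Int)) :
    l.foldl (fun (st : (Int × Int) × List (Int × Int)) _ =>
        ((st.1.1 + dx, st.1.2 + dy), st.2 ++ [(st.1.1 + dx, st.1.2 + dy)])) ((px, py), acc)
    = ((px + l.length * dx, py + l.length * dy),
       acc ++ (List.range l.length).map
         (fun (k : Nat) => (px + ((k : Int) + 1) * dx, py + ((k : Int) + 1) * dy))) := by
  induction l generalizing px py acc with
  | nil => simp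
  | cons a t ih =>
    have hmap : (List.range (t.length + 1)).map
        (fun (k : Nat) => (px + ((k : Int) + 1) * dx, py + ((k : Int) + 1) * dy))
        = (px + dx, py + dy) ::
          (List.range t.length).map
            (fun (k : Nat) => (px + dx + ((k : Int) + 1) * dx, py + dy + ((k : Int) + 1) * dy)) := by
      rw [List.range_succ_eq_map, List.map_cons, List.map_map]
      refine congrArg₂ _ ?_ ?_
      · rw [Prod.mk.injEq]; constructor <;> (push_cast; ring)
      · apply map_range_ext; intro k; rw [Function.comp_apply, Prod.mk.injEq]
        constructor <;> (push_cast; ring)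
    rw [List.foldl_cons, ih, List.length_cons, hmap, Prod.mk.injEq]
    constructor
    · rw [Prod.mk.injEq]; constructor <;> (push_cast; ring)
    · simp

lemma a_eq_ring (r : Int) : clockwise_ring_offsets_py r = pvRing r := by
  unfold clockwise_ring_offsets_py pvRing
  simp only [PySem.List.foldl_append_singleton_eq_map, PySem.List.pyRange_one,
    PySem.List.pyRange_neg_one, List.map_map, List.append_assoc]
  have h1 : (r + 1 - 1).toNat = r.toNat := by omega
  have h2 : (r - 1 - (-r - 1)).toNat = (2 * r).toNat := by omega
  have h3 : (r + 1 - (-r + 1)).toNat = (2 * r).toNat := by omega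
  rw [h1, h2, h3]
  congr 1
  refine congrArg₂ (· ++ ·) ?_ (congrArg₂ (· ++ ·) ?_ (congrArg₂ (· ++ ·) ?_ ?_)) <;>
    (apply map_range_ext; intro k; rw [Function.comp_apply, Prod.mk.injEq];
     constructor <;> (push_cast; ring))

lemma b_eq_ring (r : Int) : clockwise_ring_offsets_py_alt r = pvRing r := by
  unfold clockwise_ring_offsets_py_alt pvRing
  simp only [List.foldl_cons, List.foldl_nil, walk_eq, PySem.List.length_pyRange_one]
  by_cases hr : r ≤ 0
  · have h0 : (r - 0).toNat = 0 := by omega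
    have h1 : (2 * r - 0).toNat = 0 := by omega
    have h2 : r.toNat = 0 := by omega
    have h3 : (2 * r).toNat = 0 := by omega
    simp [h2, h3]
  · have h0 : (r - 0).toNat = r.toNat := by omega
    have h1 : (2 * r - 0).toNat = (2 * r).toNat := by omega
    have hc : ((r.toNat : Int)) = r := Int.toNat_of_nonneg (by omega)
    have hc2 : (((2 * r).toNat : Int)) = 2 * r := Int.toNat_of_nonneg (by omega)
    rw [h0, h1, hc, hc2]
    simp only [List.append_assoc]
    congr 1
    congr 1
    · apply map_range_ext; intro k; rw [Prod.mk.injEq]; constructor <;> ring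
    congr 1
    · apply map_range_ext; intro k; rw [Prod.mk.injEq]; constructor <;> ring
    congr 1
    · apply map_range_ext; intro k; rw [Prod.mk.injEq]; constructor <;> ring
    · apply map_range_ext; intro k; rw [Prod.mk.injEq]; constructor <;> ring

-- ===== VERDICT (by name: the statement is the Claim_ definition above) =====
theorem clockwise_ring_offsets_py_spec : Claim_equal_clockwise_ring_offsets_py := by
  intro r _
  unfold Spec_clockwise_ring_offsets_py
  rw [a_eq_ring, b_eq_ring]
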